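-- pv_equiv track=rewrite | github.com/IRNAS/nrf52-zephyr-mcuboot-ble-dfu-python | src/mcuboot_dfu.py | get_image_data
-- ===== SOURCE A (Python) =====
-- def get_image_data(listed_images, file_hash):
--     """Return tuple of True/False and image data if True"""
--     image_exists = False
--     image_data = None
--     for image in listed_images:
--         if image["hash"] == file_hash:
--             image_exists = True
--             image_data = image
--
--     return image_exists, image_data
-- ===== SOURCE B (Python) =====
-- def get_image_data(listed_images, file_hash):
--     """Return tuple of True/False and image data if True"""
--     for image in reversed(listed_images):
--         if image["hash"] == file_hash:
--             return True, image
--     return False, None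
-- ===== Notes on version B (the rewrite author's own statement) =====
-- stated objective: idiomatic
-- what changed: Replaces A's full forward sweep that keeps overwriting the last match with a reverse scan that returns early on the first match (equal to A's last forward match).
import Mathlib
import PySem

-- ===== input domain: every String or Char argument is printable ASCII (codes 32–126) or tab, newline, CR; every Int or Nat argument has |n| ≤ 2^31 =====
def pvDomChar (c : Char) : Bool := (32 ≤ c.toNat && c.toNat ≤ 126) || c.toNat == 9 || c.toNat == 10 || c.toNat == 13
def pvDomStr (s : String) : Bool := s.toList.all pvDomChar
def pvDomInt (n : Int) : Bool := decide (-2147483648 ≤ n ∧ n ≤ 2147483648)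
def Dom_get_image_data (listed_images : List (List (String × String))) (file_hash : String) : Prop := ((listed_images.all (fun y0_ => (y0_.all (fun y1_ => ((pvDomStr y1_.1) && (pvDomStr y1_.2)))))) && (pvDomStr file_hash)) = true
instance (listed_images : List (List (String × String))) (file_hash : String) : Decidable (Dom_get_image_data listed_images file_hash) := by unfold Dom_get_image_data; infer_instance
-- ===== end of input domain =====

-- B replaces A's full forward sweep keeping the last match by a reverse scan with early return (idiomatic; same O(n) cost).

-- ===== PORT A =====
-- A: forward loop over all images, overwriting (image_exists, image_data) on every hash match.
-- image["hash"] is (Dict.mk image).get?; under Pre_ it is always `some`, so comparing with `some file_hash` is exact.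
def get_image_data (listed_images : List (List (String × String))) (file_hash : String) : Bool × (Option (List (String × String))) :=
  listed_images.foldl
    (fun st image =>
      if (PySem.Dict.mk image).get? "hash" = some file_hash then (true, some image) else st)
    (false, none)

-- ===== PORT B =====
-- B: scan reversed(listed_images), return (True, image) on the first match, else (False, None).
def getImageRevGo (file_hash : String) : List (List (String × String)) → Bool × (Option (List (String × String)))
  | [] => (false, none)
  | image :: rest =>
      if (PySem.Dict.mk image).get? "hash" = some file_hash then (true, some image)
      else getImageRevGo file_hash rest

def get_image_data_alt (listed_images : List (List (String × String))) (file_hash : String) : Bool × (Option (List (String × String))) :=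
  getImageRevGo file_hash listed_images.reverse

-- ===== PRECONDITION & SPEC =====
-- Pre_ excludes exactly the inputs where some image lacks a "hash" key, on which Python A raises KeyError.
def Pre_get_image_data (listed_images : List (List (String × String))) (file_hash : String) : Prop :=
  listed_images.all (fun image => ((PySem.Dict.mk image).get? "hash").isSome) = true
instance (listed_images : List (List (String × String))) (file_hash : String) : Decidable (Pre_get_image_data listed_images file_hash) := by unfold Pre_get_image_data; infer_instance
def pvWitness_get_image_data : (List (List (String × String))) × String := ([[("hash", "a")], [("hash", "b")]], "b")

def Spec_get_image_data (listed_images : List (List (String × String))) (file_hash : String) (out : Bool × (Option (List (String × String)))) : Prop := out = get_image_data_alt listed_images file_hash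
instance (listed_images : List (List (String × String))) (file_hash : String) (out : Bool × (Option (List (String × String)))) : Decidable (Spec_get_image_data listed_images file_hash out) := by unfold Spec_get_image_data; infer_instance

-- ===== CLAIM (what is proved, stated in full; the proofs are below) =====
def Claim_equal_get_image_data : Prop := ∀ (listed_images : List (List (String × String))) (file_hash : String), Dom_get_image_data listed_images file_hash → Pre_get_image_data listed_images file_hash → Spec_get_image_data listed_images file_hash (get_image_data listed_images file_hash)

-- ===== LEMMAS AND PROOFS =====

theorem getImageRevGo_append (fh : String) (a b : List (List (String × String))) :
    getImageRevGo fh (a ++ b) = if (getImageRevGo fh a).1 then getImageRevGo fh a else getImageRevGo fh b := by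
  induction a with
  | nil => simp [getImageRevGo]
  | cons x xs ih =>
      simp only [List.cons_append, getImageRevGo]
      split_ifs with h <;> simp_all

theorem foldl_eq_revGo (fh : String) (l : List (List (String × String)))
    (init : Bool × (Option (List (String × String)))) :
    l.foldl (fun st image => if (PySem.Dict.mk image).get? "hash" = some fh then (true, some image) else st) init
      = if (getImageRevGo fh l.reverse).1 then getImageRevGo fh l.reverse else init := by
  induction l generalizing init with
  | nil => simp [getImageRevGo]
  | cons x xs ih =>
      simp only [List.foldl_cons, List.reverse_cons, getImageRevGo_append]
      rw [ih]
      by_cases h : ((PySem.Dict.mk x).get? "hash" = some fh) <;>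
        split_ifs <;> simp_all [getImageRevGo]

theorem revGo_of_fst_false (fh : String) (l : List (List (String × String)))
    (h : (getImageRevGo fh l).1 = false) : getImageRevGo fh l = (false, none) := by
  induction l with
  | nil => rfl
  | cons x xs ih =>
      simp only [getImageRevGo] at *
      split_ifs at h ⊢ with h' <;> simp_all

-- ===== VERDICT (by name: the statement is the Claim_ definition above) =====
theorem get_image_data_spec : Claim_equal_get_image_data := by
  intro li fh _ _
  unfold Spec_get_image_data get_image_data get_image_data_alt
  rw [foldl_eq_revGo]
  split_ifs with h
  · rfl
  · exact (revGo_of_fst_false fh li.reverse (by simpa using h)).symm
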